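-- pv_equiv track=rewrite | github.com/haiyu001/ds-healthcare | double_propagation/absa/ranking.py | _get_noun_phrases_ids
-- ===== SOURCE A (Python) =====
-- from typing import Tuple, Dict, List
--
-- def _get_noun_phrases_ids(pos_list: List[str], noun_phrase_max_words_count: int = 4) -> List[Tuple[int, int]]:
--     res = []
--     noun_propn_ids = [i for i, pos in enumerate(pos_list) if pos == "NOUN" or pos == "PROPN"]
--     size = len(noun_propn_ids)
--     if size >= 2:
--         start = end = noun_propn_ids[0]
--         i = 1
--         while i <= size:
--             if i != size and noun_propn_ids[i] == noun_propn_ids[i - 1] + 1: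
--                 end = noun_propn_ids[i]
--             else:
--                 if 2 <= end - start + 1 <= noun_phrase_max_words_count:
--                     res.append((start, end + 1))
--                 start = end = noun_propn_ids[i] if i < size else -1
--             i += 1
--     return res
-- ===== SOURCE B (Python) =====
-- def _get_noun_phrases_ids(pos_list, noun_phrase_max_words_count=4):
--     res = []
--     run_start = None
--     for i, pos in enumerate(pos_list):
--         if pos == "NOUN" or pos == "PROPN":
--             if run_start is None:
--                 run_start = i
--         else:
--             if run_start is not None:
--                 if 2 <= i - run_start <= noun_phrase_max_words_count:
--                     res.append((run_start, i))
--                 run_start = None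
--     if run_start is not None:
--         n = len(pos_list)
--         if 2 <= n - run_start <= noun_phrase_max_words_count:
--             res.append((run_start, n))
--     return res
-- ===== Notes on version B (the rewrite author's own statement) =====
-- stated objective: simpler
-- what changed: B scans pos_list once keeping only a run_start marker for the current NOUN/PROPN run, instead of A's two-phase build of an index list of all noun positions followed by an adjacency rescan of that list.
import Mathlib
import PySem

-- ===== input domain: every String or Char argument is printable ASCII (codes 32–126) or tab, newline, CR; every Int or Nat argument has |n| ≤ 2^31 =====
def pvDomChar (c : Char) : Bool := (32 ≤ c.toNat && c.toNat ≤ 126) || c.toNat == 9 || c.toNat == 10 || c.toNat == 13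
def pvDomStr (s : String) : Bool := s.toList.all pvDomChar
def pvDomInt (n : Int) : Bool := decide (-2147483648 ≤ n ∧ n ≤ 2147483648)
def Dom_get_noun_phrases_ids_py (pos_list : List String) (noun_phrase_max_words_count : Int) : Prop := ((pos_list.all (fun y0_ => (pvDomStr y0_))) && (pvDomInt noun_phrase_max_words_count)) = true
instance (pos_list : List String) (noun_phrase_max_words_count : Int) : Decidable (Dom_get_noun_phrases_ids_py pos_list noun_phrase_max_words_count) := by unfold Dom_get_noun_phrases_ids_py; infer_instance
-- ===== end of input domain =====

-- B replaces A's build-index-list-then-rescan-adjacency two-phase algorithm by a single pass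
-- over pos_list with a run_start marker (objective: simpler). Return values proved equal on all inputs.

-- ===== PORT A =====
-- the comprehension [i for i, pos in enumerate(pos_list) if pos == "NOUN" or pos == "PROPN"],
-- written as the obvious recursion carrying the enumerate counter k
def pvIds : List String → Int → List Int
  | [], _ => []
  | p :: t, k => if p = "NOUN" ∨ p = "PROPN" then k :: pvIds t (k + 1) else pvIds t (k + 1)

-- A's while loop over noun_propn_ids: the remaining suffix of the id list is the part not yet
-- scanned; since after every iteration end_ equals noun_propn_ids[i-1], the comparison
-- noun_propn_ids[i] == noun_propn_ids[i-1] + 1 is h = e + 1.  The i == size iteration is the [] case.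
def pvA_loop (m : Int) : List Int → Int → Int → List (Int × Int) → List (Int × Int)
  | [], s, e, res =>
      if 2 ≤ e - s + 1 ∧ e - s + 1 ≤ m then res ++ [(s, e + 1)] else res
  | h :: t, s, e, res =>
      if h = e + 1 then
        pvA_loop m t s h res
      else
        pvA_loop m t h h
          (if 2 ≤ e - s + 1 ∧ e - s + 1 ≤ m then res ++ [(s, e + 1)] else res)

def get_noun_phrases_ids_py (pos_list : List String) (noun_phrase_max_words_count : Int) : List (Int × Int) :=
  let noun_propn_ids := pvIds pos_list 0
  if 2 ≤ noun_propn_ids.length then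
    match noun_propn_ids with
    | [] => []
    | h :: t => pvA_loop noun_phrase_max_words_count t h h []
  else []

-- ===== PORT B =====
-- B's for loop over enumerate(pos_list) with state (res, run_start); the [] case is the
-- final close after the loop (k has become len(pos_list)).
def pvB_loop (m : Int) : List String → Int → Option Int → List (Int × Int) → List (Int × Int)
  | [], k, run, res =>
      match run with
      | some s => if 2 ≤ k - s ∧ k - s ≤ m then res ++ [(s, k)] else res
      | none => res
  | p :: t, k, run, res =>
      if p = "NOUN" ∨ p = "PROPN" then
        pvB_loop m t (k + 1) (match run with | none => some k | some s => some s) res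
      else
        match run with
        | some s =>
            pvB_loop m t (k + 1) none
              (if 2 ≤ k - s ∧ k - s ≤ m then res ++ [(s, k)] else res)
        | none => pvB_loop m t (k + 1) none res

def get_noun_phrases_ids_py_alt (pos_list : List String) (noun_phrase_max_words_count : Int) : List (Int × Int) :=
  pvB_loop noun_phrase_max_words_count pos_list 0 none []

-- ===== PRECONDITION & SPEC =====
def Spec_get_noun_phrases_ids_py (pos_list : List String) (noun_phrase_max_words_count : Int) (out : List (Int × Int)) : Prop := out = get_noun_phrases_ids_py_alt pos_list noun_phrase_max_words_count
instance (pos_list : List String) (noun_phrase_max_words_count : Int) (out : List (Int × Int)) : Decidable (Spec_get_noun_phrases_ids_py pos_list noun_phrase_max_words_count out) := by unfold Spec_get_noun_phrases_ids_py; infer_instance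

-- ===== CLAIM (what is proved, stated in full; the proofs are below) =====
def Claim_equal_get_noun_phrases_ids_py : Prop := ∀ (pos_list : List String) (noun_phrase_max_words_count : Int), Dom_get_noun_phrases_ids_py pos_list noun_phrase_max_words_count → Spec_get_noun_phrases_ids_py pos_list noun_phrase_max_words_count (get_noun_phrases_ids_py pos_list noun_phrase_max_words_count)

-- ===== LEMMAS AND PROOFS =====

-- A-side "fresh" state: about to take the next id (if any) as a new run start
def pvAStart (m : Int) (ids : List Int) (res : List (Int × Int)) : List (Int × Int) :=
  match ids with
  | [] => res
  | h :: t => pvA_loop m t h h res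

-- The bisimulation between A's scan of the id list and B's scan of pos_list, in three
-- coupled states: open run (e = k - 1), stale pending run (e + 1 < k), and fresh.
lemma pvMain (m : Int) : ∀ (l : List String) (k s e : Int) (res : List (Int × Int)),
    (e = k - 1 →
      pvA_loop m (pvIds l k) s e res = pvB_loop m l k (some s) res)
    ∧ (e + 1 < k →
      pvA_loop m (pvIds l k) s e res =
        pvB_loop m l k none
          (if 2 ≤ e - s + 1 ∧ e - s + 1 ≤ m then res ++ [(s, e + 1)] else res))
    ∧ pvAStart m (pvIds l k) res = pvB_loop m l k none res := by
  intro l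
  induction l with
  | nil =>
      intro k s e res
      refine ⟨?_, ?_, rfl⟩
      · intro he; subst he
        have h1 : k - 1 - s + 1 = k - s := by ring
        have h2 : k - 1 + 1 = k := by ring
        simp [pvIds, pvA_loop, pvB_loop, h1, h2]
      · intro _; simp [pvIds, pvA_loop, pvB_loop]
  | cons p t ih =>
      intro k s e res
      by_cases hp : p = "NOUN" ∨ p = "PROPN"
      · refine ⟨?_, ?_, ?_⟩
        · intro he; subst he
          simp only [pvIds, if_pos hp, pvA_loop, pvB_loop]
          rw [if_pos (by ring)]
          exact (ih (k + 1) s k res).1 (by ring)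
        · intro hlt
          simp only [pvIds, if_pos hp, pvA_loop, pvB_loop]
          rw [if_neg (by omega)]
          exact (ih (k + 1) k k _).1 (by ring)
        · simp only [pvIds, if_pos hp, pvAStart, pvB_loop]
          exact (ih (k + 1) k k res).1 (by ring)
      · refine ⟨?_, ?_, ?_⟩
        · intro he; subst he
          simp only [pvIds, if_neg hp, pvB_loop]
          have h1 : k - 1 - s + 1 = k - s := by ring
          have h2 : k - 1 + 1 = k := by ring
          rw [(ih (k + 1) s (k - 1) res).2.1 (by omega)]
          rw [h1, h2]
        · intro hlt
          simp only [pvIds, if_neg hp, pvB_loop]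
          exact (ih (k + 1) s e res).2.1 (by omega)
        · simp only [pvIds, if_neg hp, pvAStart, pvB_loop]
          exact (ih (k + 1) s e res).2.2

-- ===== VERDICT (by name: the statement is the Claim_ definition above) =====
theorem get_noun_phrases_ids_py_spec : Claim_equal_get_noun_phrases_ids_py := by
  intro l m _
  unfold Spec_get_noun_phrases_ids_py get_noun_phrases_ids_py get_noun_phrases_ids_py_alt
  have hmain := (pvMain m l 0 0 0 []).2.2
  by_cases hlen : 2 ≤ (pvIds l 0).length
  · simp only [if_pos hlen]
    cases h : pvIds l 0 with
    | nil => simp [h] at hlen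
    | cons a t =>
        rw [h] at hmain
        simpa [pvAStart] using hmain
  · simp only [if_neg hlen]
    rw [← hmain]
    cases h : pvIds l 0 with
    | nil => simp [pvAStart]
    | cons a t =>
        cases t with
        | nil =>
            simp [pvAStart, pvA_loop]
        | cons b u => rw [h] at hlen; simp at hlen
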